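-- pv_equiv track=rewrite | github.com/Masked-Action-Model/Masked-Action-Model | examples/baselines/diffusion_policy/evaluate/evaluate_mas_window_mixed.py | _build_padded_eval_batches
-- ===== SOURCE A (Python) =====
-- def _build_padded_eval_batches(total_items: int, batch_size: int):
--     if total_items <= 0:
--         return []
--     if batch_size <= 0:
--         raise ValueError(f"batch_size must be positive, got {batch_size}")
--     batches = []
--     for start in range(0, total_items, batch_size):
--         valid_indices = list(range(start, min(start + batch_size, total_items)))
--         padded_indices = valid_indices[:]
--         while len(padded_indices) < batch_size:
--             padded_indices.append(valid_indices[-1])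
--         batches.append((padded_indices, len(valid_indices)))
--     return batches
-- ===== SOURCE B (Python) =====
-- def _build_padded_eval_batches(total_items: int, batch_size: int):
--     if total_items <= 0:
--         return []
--     if batch_size <= 0:
--         raise ValueError(f"batch_size must be positive, got {batch_size}")
--     last = total_items - 1
--     return [
--         ([min(start + j, last) for j in range(batch_size)],
--          min(batch_size, total_items - start))
--         for start in range(0, total_items, batch_size)
--     ]
-- ===== Notes on version B (the rewrite author's own statement) =====
-- stated objective: simpler
-- what changed: The build-valid-list-then-while-pad inner steps are replaced by a single closed-form comprehension that clamps each index with min(start+j, total_items-1) and computes the valid count arithmetically as min(batch_size, total_items-start).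
import Mathlib
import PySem

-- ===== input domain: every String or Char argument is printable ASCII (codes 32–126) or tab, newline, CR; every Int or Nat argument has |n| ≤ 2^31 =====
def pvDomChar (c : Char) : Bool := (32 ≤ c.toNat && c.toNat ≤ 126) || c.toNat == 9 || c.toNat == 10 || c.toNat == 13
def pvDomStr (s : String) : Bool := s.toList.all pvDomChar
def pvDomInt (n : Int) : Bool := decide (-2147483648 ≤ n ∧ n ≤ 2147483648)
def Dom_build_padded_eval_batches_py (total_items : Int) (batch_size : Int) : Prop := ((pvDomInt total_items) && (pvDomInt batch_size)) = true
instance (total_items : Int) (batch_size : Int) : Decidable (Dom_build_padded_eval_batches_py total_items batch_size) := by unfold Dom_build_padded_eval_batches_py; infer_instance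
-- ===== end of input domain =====

-- B replaces A's build-valid-list-then-while-pad inner steps by a closed-form comprehension that
-- clamps each index with min (start+j) (total_items-1) and computes the valid count arithmetically (objective: simpler).


-- ===== PORT A =====
-- while len(padded_indices) < batch_size: padded_indices.append(valid_indices[-1])
-- valid_indices[-1] is ported as pyGetD valid (-1) 0: exact, since the body only runs with
-- valid nonempty (Python would raise IndexError on an empty valid; that state is unreachable here).
def pvPadWhile (batch_size : Int) (valid : List Int) (padded : List Int) : List Int :=
  if h : (padded.length : Int) < batch_size then
    pvPadWhile batch_size valid (padded ++ [PySem.List.pyGetD valid (-1) 0])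
  else padded
termination_by (batch_size - padded.length).toNat
decreasing_by simp only [List.length_append, List.length_cons, List.length_nil]; omega

def build_padded_eval_batches_py (total_items : Int) (batch_size : Int) : List (List Int × Int) :=
  if total_items ≤ 0 then []
  else if batch_size ≤ 0 then []  -- Python raises ValueError here; excluded by Pre_
  else
    (PySem.List.pyRange 0 total_items batch_size).foldl
      (fun batches start =>
        let valid := PySem.List.pyRange start (min (start + batch_size) total_items) 1
        let padded := pvPadWhile batch_size valid valid
        batches ++ [(padded, (valid.length : Int))]) []

-- ===== PORT B =====
def build_padded_eval_batches_py_alt (total_items : Int) (batch_size : Int) : List (List Int × Int) :=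
  if total_items ≤ 0 then []
  else if batch_size ≤ 0 then []  -- Python raises ValueError here; excluded by Pre_
  else
    let last := total_items - 1
    (PySem.List.pyRange 0 total_items batch_size).map
      (fun start =>
        ((PySem.List.pyRange 0 batch_size 1).map (fun j => min (start + j) last),
         min batch_size (total_items - start)))

-- ===== PRECONDITION & SPEC =====
-- Pre_ excludes exactly the inputs where A raises ValueError: total_items > 0 with batch_size ≤ 0.
def Pre_build_padded_eval_batches_py (total_items : Int) (batch_size : Int) : Prop :=
  total_items ≤ 0 ∨ 0 < batch_size
instance (total_items : Int) (batch_size : Int) : Decidable (Pre_build_padded_eval_batches_py total_items batch_size) := by unfold Pre_build_padded_eval_batches_py; infer_instance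
def pvWitness_build_padded_eval_batches_py : Int × Int := (5, 3)

def Spec_build_padded_eval_batches_py (total_items : Int) (batch_size : Int) (out : List (List Int × Int)) : Prop := out = build_padded_eval_batches_py_alt total_items batch_size
instance (total_items : Int) (batch_size : Int) (out : List (List Int × Int)) : Decidable (Spec_build_padded_eval_batches_py total_items batch_size out) := by unfold Spec_build_padded_eval_batches_py; infer_instance

-- ===== CLAIM (what is proved, stated in full; the proofs are below) =====
def Claim_equal_build_padded_eval_batches_py : Prop := ∀ (total_items : Int) (batch_size : Int), Dom_build_padded_eval_batches_py total_items batch_size → Pre_build_padded_eval_batches_py total_items batch_size → Spec_build_padded_eval_batches_py total_items batch_size (build_padded_eval_batches_py total_items batch_size)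

-- ===== LEMMAS AND PROOFS =====

-- The while loop appends the fixed element until the length reaches batch_size.
theorem pvPadWhile_eq (batch_size : Int) (valid padded : List Int) :
    pvPadWhile batch_size valid padded
      = padded ++ List.replicate (batch_size.toNat - padded.length) (PySem.List.pyGetD valid (-1) 0) := by
  fun_induction pvPadWhile batch_size valid padded with
  | case1 padded h ih =>
      rw [ih]
      rw [List.append_assoc]
      congr 1
      have : batch_size.toNat - padded.length = (batch_size.toNat - (padded ++ [PySem.List.pyGetD valid (-1) 0]).length) + 1 := by
        simp only [List.length_append, List.length_cons, List.length_nil]; omega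
      rw [this, List.replicate_succ]
      simp
  | case2 padded h =>
      have : batch_size.toNat - padded.length = 0 := by omega
      simp [this]

-- Per-batch equality: A's padded list and count equal B's closed forms.
theorem pvBatch_eq (total_items batch_size start : Int)
    (hb : 0 < batch_size) (h0 : 0 ≤ start) (hlt : start < total_items) :
    (pvPadWhile batch_size (PySem.List.pyRange start (min (start + batch_size) total_items) 1)
        (PySem.List.pyRange start (min (start + batch_size) total_items) 1),
     (((PySem.List.pyRange start (min (start + batch_size) total_items) 1).length : Int)))
    = ((PySem.List.pyRange 0 batch_size 1).map (fun j => min (start + j) (total_items - 1)),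
       min batch_size (total_items - start)) := by
  set m := min (start + batch_size) total_items with hm
  have hsm : start < m := by omega
  have hlen : (PySem.List.pyRange start m 1).length = (m - start).toNat :=
    PySem.List.length_pyRange_one start m
  have hlast : PySem.List.pyGetD (PySem.List.pyRange start m 1) (-1) 0 = m - 1 := by
    rw [PySem.List.pyRange_one]
    have hne : (List.range (m - start).toNat).map (fun k : Nat => start + (k : Int)) ≠ [] := by
      simp; omega
    rw [PySem.List.pyGetD_neg_ofNat _ 1 0 (by omega) (by simp; omega)]

    simp only [List.getElem_map, List.getElem_range, List.length_map, List.length_range]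
    omega
  simp only [Prod.mk.injEq]
  constructor
  · rw [pvPadWhile_eq, hlast, hlen]
    rw [PySem.List.pyRange_one, PySem.List.pyRange_one]
    apply List.ext_getElem
    · simp only [List.length_append, List.length_map, List.length_range, List.length_replicate]
      omega
    · intro k hk1 hk2
      simp only [List.length_append, List.length_map, List.length_range, List.length_replicate] at hk1
      simp only [List.length_map, List.length_range] at hk2
      simp only [List.getElem_map, List.getElem_range, Int.sub_zero]
      by_cases hcase : k < (m - start).toNat
      · rw [List.getElem_append_left (by simpa using hcase)]
        simp only [List.getElem_map, List.getElem_range]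
        have : start + (k : Int) ≤ total_items - 1 := by omega
        omega
      · rw [List.getElem_append_right (by simpa using hcase)]
        simp only [List.length_map, List.length_range, List.getElem_replicate]
        have hmt : m = total_items := by omega
        have : total_items - 1 ≤ start + (k : Int) := by omega
        omega
  · rw [hlen]; omega

-- ===== VERDICT (by name: the statement is the Claim_ definition above) =====
theorem build_padded_eval_batches_py_spec : Claim_equal_build_padded_eval_batches_py := by
  intro total_items batch_size _ hpre
  unfold Spec_build_padded_eval_batches_py build_padded_eval_batches_py build_padded_eval_batches_py_alt
  by_cases ht : total_items ≤ 0
  · simp [ht]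
  · have hb : 0 < batch_size := hpre.resolve_left ht
    simp only [if_neg ht, if_neg (by omega : ¬ batch_size ≤ 0)]
    rw [PySem.List.foldl_append_singleton_eq_map]
    apply List.map_congr_left
    intro start hs
    have hmem := ((PySem.List.mem_pyRange_iff_of_pos hb) start).mp hs
    exact pvBatch_eq total_items batch_size start hb (by omega) (by omega)
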